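-- pv_equiv track=rewrite | github.com/starkarthikr/General-cybersecurity-news | scripts/parse_cybersec_feeds.py | categorize_threat
-- ===== SOURCE A (Python) =====
-- def categorize_threat(title, content):
--     """Categorize the type of cybersecurity threat"""
--     title_lower = title.lower()
--     content_lower = content.lower() if content else ''
--
--     categories = []
--
--     threat_types = {
--         'Ransomware': ['ransomware', 'ransom', 'lockbit', 'blackcat', 'alphv'],
--         'Data Breach': ['data breach', 'leaked', 'exposed database', 'stolen data'],
--         'Vulnerability': ['vulnerability', 'cve-', 'zero-day', 'exploit', 'patch'],
--         'Malware': ['malware', 'trojan', 'backdoor', 'rootkit', 'botnet'],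
--         'Phishing': ['phishing', 'spear phishing', 'social engineering', 'credential theft'],
--         'APT/Nation-State': ['apt', 'nation-state', 'state-sponsored', 'lazarus', 'apt28'],
--         'DDoS': ['ddos', 'denial of service', 'botnet attack'],
--         'Supply Chain': ['supply chain', 'third-party', 'vendor compromise'],
--         'Cloud Security': ['cloud', 'aws', 'azure', 'gcp', 's3 bucket'],
--         'IoT/OT': ['iot', 'industrial', 'scada', 'ot security'],
--     }
--
--     for category, keywords in threat_types.items():
--         for keyword in keywords:
--             if keyword in title_lower or keyword in content_lower:
--                 categories.append(category)
--                 break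
--
--     return categories if categories else ['General Security']
-- ===== SOURCE B (Python) =====
-- THREAT_TYPES = {
--     'Ransomware': ['ransomware', 'ransom', 'lockbit', 'blackcat', 'alphv'],
--     'Data Breach': ['data breach', 'leaked', 'exposed database', 'stolen data'],
--     'Vulnerability': ['vulnerability', 'cve-', 'zero-day', 'exploit', 'patch'],
--     'Malware': ['malware', 'trojan', 'backdoor', 'rootkit', 'botnet'],
--     'Phishing': ['phishing', 'spear phishing', 'social engineering', 'credential theft'],
--     'APT/Nation-State': ['apt', 'nation-state', 'state-sponsored', 'lazarus', 'apt28'],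
--     'DDoS': ['ddos', 'denial of service', 'botnet attack'],
--     'Supply Chain': ['supply chain', 'third-party', 'vendor compromise'],
--     'Cloud Security': ['cloud', 'aws', 'azure', 'gcp', 's3 bucket'],
--     'IoT/OT': ['iot', 'industrial', 'scada', 'ot security'],
-- }
--
-- # (keyword, category) pairs, flattened in table order
-- KEYWORD_PAIRS = [(kw, cat) for cat, kws in THREAT_TYPES.items() for kw in kws]
-- # first-character index: bucket of the pairs whose keyword starts with that character
-- KEYWORD_INDEX = {ch: [(kw, cat) for kw, cat in KEYWORD_PAIRS if kw[0] == ch]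
--                  for ch in {kw[0] for kw, _ in KEYWORD_PAIRS}}
--
--
-- def categorize_threat(title, content):
--     """Categorize the type of cybersecurity threat"""
--     # Text-driven scan instead of keyword-driven scan: walk every position of a
--     # single lowercased haystack (title + '\n' + content; the '\n' separator,
--     # which occurs in no keyword, stops matches spanning the boundary), look up
--     # only the keywords starting with the character at that position, and record
--     # their categories in a set; then emit the recorded categories in table order.
--     combined = title.lower() + '\n' + (content.lower() if content else '')
--     matched = set()
--     for i, ch in enumerate(combined):
--         for kw, cat in KEYWORD_INDEX.get(ch, ()):
--             if combined.startswith(kw, i):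
--                 matched.add(cat)
--     cats = [c for c in THREAT_TYPES if c in matched]
--     return cats or ['General Security']
-- ===== Notes on version B (the rewrite author's own statement) =====
-- stated objective: alternative
-- what changed: Inverts the traversal: instead of testing each keyword against the two haystacks with 'in', B walks every position of one lowercased combined haystack (title+'\n'+content), looks the position's character up in a precomputed first-character index of (keyword, category) pairs, records hit categories in a set, and finally lists the recorded categories in table order.
import Mathlib
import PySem

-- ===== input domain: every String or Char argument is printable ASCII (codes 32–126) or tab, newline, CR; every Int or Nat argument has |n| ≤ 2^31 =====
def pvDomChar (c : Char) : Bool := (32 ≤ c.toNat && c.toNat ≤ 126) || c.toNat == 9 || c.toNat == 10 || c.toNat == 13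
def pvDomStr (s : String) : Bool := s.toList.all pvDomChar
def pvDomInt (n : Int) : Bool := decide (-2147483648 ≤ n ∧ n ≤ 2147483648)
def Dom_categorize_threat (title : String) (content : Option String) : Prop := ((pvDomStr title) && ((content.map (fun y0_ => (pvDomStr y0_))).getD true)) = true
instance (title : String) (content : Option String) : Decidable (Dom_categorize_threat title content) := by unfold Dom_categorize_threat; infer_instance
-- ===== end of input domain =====

-- B inverts the traversal (alternative): it walks every position of one lowercased combined
-- haystack, looks the position's character up in a first-character index of (keyword, category)
-- pairs, records hit categories in a set, then lists them in table order — instead of A's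
-- per-keyword 'in' tests against two haystacks.

-- shared keyword table (the dict literal of both Pythons, in insertion order)
def threatTypes : List (String × List String) :=
  [("Ransomware", ["ransomware", "ransom", "lockbit", "blackcat", "alphv"]),
   ("Data Breach", ["data breach", "leaked", "exposed database", "stolen data"]),
   ("Vulnerability", ["vulnerability", "cve-", "zero-day", "exploit", "patch"]),
   ("Malware", ["malware", "trojan", "backdoor", "rootkit", "botnet"]),
   ("Phishing", ["phishing", "spear phishing", "social engineering", "credential theft"]),
   ("APT/Nation-State", ["apt", "nation-state", "state-sponsored", "lazarus", "apt28"]),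
   ("DDoS", ["ddos", "denial of service", "botnet attack"]),
   ("Supply Chain", ["supply chain", "third-party", "vendor compromise"]),
   ("Cloud Security", ["cloud", "aws", "azure", "gcp", "s3 bucket"]),
   ("IoT/OT", ["iot", "industrial", "scada", "ot security"])]

-- ===== PORT A =====
def categorize_threat (title : String) (content : Option String) : List String :=
  let title_lower := PySem.Str.lower title
  let content_lower := match content with
    | some c => PySem.Str.lower c   -- 'content.lower() if content else ""' (lower "" = "")
    | none => ""
  -- inner 'for keyword … break' = append the category once if any keyword matches
  let categories := threatTypes.foldl
    (fun acc p =>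
      if p.2.any (fun kw => PySem.Str.isIn kw title_lower || PySem.Str.isIn kw content_lower)
      then acc ++ [p.1] else acc) []
  if categories.isEmpty then ["General Security"] else categories

-- ===== PORT B =====
-- B's module-level constants: the flattened (keyword, category) pairs and the
-- first-character index {ch: pairs whose keyword starts with ch}.
def keywordPairs : List (String × String) :=
  threatTypes.flatMap (fun p => p.2.map (fun kw => (kw, p.1)))

def firstChar (s : String) : Char := s.toList.headD ' '   -- kw[0] (every keyword is nonempty)

-- the dict comprehension over the set of first characters; the dict is only looked up
-- afterwards, so the set's iteration order cannot affect the result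
def keywordIndex : PySem.Dict Char (List (String × String)) :=
  (PySem.Set.ofList (keywordPairs.map (fun q => firstChar q.1))).foldl
    (fun d ch => d.insert ch (keywordPairs.filter (fun q => firstChar q.1 == ch)))
    PySem.Dict.empty

def categorize_threat_alt (title : String) (content : Option String) : List String :=
  let combined : List Char :=
    PySem.Chars.lower title.toList ++ '\n' ::
      (match content with
       | some c => PySem.Chars.lower c.toList
       | none => [])
  -- for i, ch in enumerate(combined): for kw, cat in KEYWORD_INDEX.get(ch, ()): …
  let matched : PySem.Set String :=
    (PySem.List.enumerate combined).foldl
      (fun s e =>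
        (PySem.Dict.getD keywordIndex e.2 []).foldl
          (fun s q => if q.1.toList.isPrefixOf (combined.drop e.1.toNat)
                      then PySem.Set.add s q.2 else s) s)
      PySem.Set.empty
  let cats := (threatTypes.map Prod.fst).filter (fun c => PySem.Set.contains matched c)
  if cats.isEmpty then ["General Security"] else cats

-- ===== PRECONDITION & SPEC =====
def Spec_categorize_threat (title : String) (content : Option String) (out : List String) : Prop := out = categorize_threat_alt title content
instance (title : String) (content : Option String) (out : List String) : Decidable (Spec_categorize_threat title content out) := by unfold Spec_categorize_threat; infer_instance

-- ===== CLAIM (what is proved, stated in full; the proofs are below) =====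
def Claim_equal_categorize_threat : Prop := ∀ (title : String) (content : Option String), Dom_categorize_threat title content → Spec_categorize_threat title content (categorize_threat title content)

-- ===== LEMMAS AND PROOFS =====

-- a pattern not containing c is a prefix of a ++ c :: b iff it is a prefix of a
lemma prefix_append_cons_of_not_mem {α} {c : α} {sub a : List α} (b : List α)
    (h : sub <+: a ++ c :: b) (hc : c ∉ sub) : sub <+: a := by
  induction sub generalizing a with
  | nil => exact List.nil_prefix
  | cons x xs ih =>
    cases a with
    | nil =>
      rcases List.cons_prefix_cons.mp h with ⟨hx, _⟩
      simp [List.mem_cons] at hc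
      exact absurd hx.symm hc.1
    | cons y a' =>
      rcases List.cons_prefix_cons.mp h with ⟨hx, htail⟩
      simp only [List.mem_cons, not_or] at hc
      exact List.cons_prefix_cons.mpr ⟨hx, ih htail hc.2⟩

-- a pattern not containing c occurs in a ++ c :: b iff it occurs in a or in b
lemma infix_append_cons_iff {α} (c : α) (sub a b : List α) (hc : c ∉ sub) :
    sub <:+: a ++ c :: b ↔ sub <:+: a ∨ sub <:+: b := by
  constructor
  · intro h
    induction a with
    | nil =>
      rcases List.infix_cons_iff.mp h with hp | hi
      · exact Or.inl ((prefix_append_cons_of_not_mem (a := []) b hp hc).isInfix)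
      · exact Or.inr hi
    | cons x a' ih =>
      rcases List.infix_cons_iff.mp h with hp | hi
      · exact Or.inl ((prefix_append_cons_of_not_mem (a := x :: a') b hp hc).isInfix)
      · rcases ih hi with h1 | h2
        · exact Or.inl (h1.trans (List.suffix_cons x a').isInfix)
        · exact Or.inr h2
  · rintro (h | h)
    · exact h.trans List.infix_append_left
    · exact (h.trans (List.suffix_cons c b).isInfix).trans List.infix_append_right

-- A's two-haystack test equals the test on the combined haystack, for newline-free keywords
lemma cond_eq (kw tl cl : List Char) (hk : '\n' ∉ kw) :
    (PySem.Chars.isIn kw tl || PySem.Chars.isIn kw cl)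
      = PySem.Chars.isIn kw (tl ++ '\n' :: cl) := by
  rw [Bool.eq_iff_iff]
  simp only [Bool.or_eq_true, PySem.Chars.isIn_iff_infix]
  exact (infix_append_cons_iff '\n' kw tl cl hk).symm

lemma any_congr_mem {α} {p q : α → Bool} :
    ∀ l : List α, (∀ a ∈ l, p a = q a) → l.any p = l.any q
  | [], _ => rfl
  | a :: l, h => by
    simp only [List.any_cons, h a List.mem_cons_self,
      any_congr_mem l (fun b hb => h b (List.mem_cons_of_mem a hb))]

-- A's accumulating pass equals a filterMap keyed by the combined-haystack condition
lemma loop_eq (tl cl : List Char) (cats : List (String × List String))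
    (h : ∀ p ∈ cats, ∀ kw ∈ p.2, '\n' ∉ kw.toList) (acc : List String) :
    cats.foldl
      (fun acc p =>
        if p.2.any (fun kw => PySem.Chars.isIn kw.toList tl || PySem.Chars.isIn kw.toList cl)
        then acc ++ [p.1] else acc) acc
    = acc ++ cats.filterMap
        (fun p => if p.2.any (fun kw => PySem.Chars.isIn kw.toList (tl ++ '\n' :: cl))
                  then some p.1 else none) := by
  induction cats generalizing acc with
  | nil => simp
  | cons p rest ih =>
    have hcond : p.2.any (fun kw => PySem.Chars.isIn kw.toList tl || PySem.Chars.isIn kw.toList cl)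
        = p.2.any (fun kw => PySem.Chars.isIn kw.toList (tl ++ '\n' :: cl)) := by
      exact any_congr_mem p.2 (fun kw hkw =>
        cond_eq kw.toList tl cl (h p List.mem_cons_self kw hkw))
    simp only [List.foldl_cons, List.filterMap_cons, hcond]
    by_cases hb : p.2.any (fun kw => PySem.Chars.isIn kw.toList (tl ++ '\n' :: cl)) = true
    · simp only [hb, if_true]
      rw [ih (fun q hq => h q (List.mem_cons_of_mem p hq)) (acc ++ [p.1])]
      simp
    · simp only [Bool.not_eq_true] at hb
      simp only [hb]
      exact ih (fun q hq => h q (List.mem_cons_of_mem p hq)) acc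

lemma no_newline_keywords : ∀ p ∈ threatTypes, ∀ kw ∈ p.2, '\n' ∉ kw.toList := by decide

lemma pairs_ne_nil : ∀ q ∈ keywordPairs, q.1.toList ≠ [] := by decide

-- two table entries with the same key are the same entry (the keys are distinct)
lemma key_determines : ∀ p ∈ threatTypes, ∀ q ∈ threatTypes, p.1 = q.1 → p = q := by decide

-- membership after a fold that conditionally adds f a for each list element
lemma mem_if_add_fold {α γ : Type} [BEq γ] [LawfulBEq γ] (cond : α → Bool) (f : α → γ)
    (l : List α) (s : PySem.Set γ) (y : γ) :
    (y ∈ l.foldl (fun s a => if cond a then PySem.Set.add s (f a) else s) s)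
      ↔ y ∈ s ∨ ∃ a ∈ l, cond a ∧ y = f a := by
  induction l generalizing s with
  | nil => simp
  | cons a rest ih =>
    simp only [List.foldl_cons]
    by_cases hc : cond a = true
    · simp only [hc, if_true, ih, PySem.Set.mem_add]
      constructor
      · rintro ((h | h) | ⟨b, hb, hcb, hy⟩)
        · exact Or.inl h
        · exact Or.inr ⟨a, List.mem_cons_self, hc, h⟩
        · exact Or.inr ⟨b, List.mem_cons_of_mem a hb, hcb, hy⟩
      · rintro (h | ⟨b, hb, hcb, hy⟩)
        · exact Or.inl (Or.inl h)
        · rcases List.mem_cons.mp hb with rfl | hb'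
          · exact Or.inl (Or.inr hy)
          · exact Or.inr ⟨b, hb', hcb, hy⟩
    · simp only [hc, ih]
      constructor
      · rintro (h | ⟨b, hb, hcb, hy⟩)
        · exact Or.inl h
        · exact Or.inr ⟨b, List.mem_cons_of_mem a hb, hcb, hy⟩
      · rintro (h | ⟨b, hb, hcb, hy⟩)
        · exact Or.inl h
        · rcases List.mem_cons.mp hb with rfl | hb'
          · exact absurd hcb hc
          · exact Or.inr ⟨b, hb', hcb, hy⟩

-- membership after B's two-level scan fold
lemma mem_scan_fold {β α γ : Type} [BEq γ] [LawfulBEq γ] (g : β → List α)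
    (cond : β → α → Bool) (f : α → γ) (l : List β) (s : PySem.Set γ) (y : γ) :
    (y ∈ l.foldl (fun s e =>
        (g e).foldl (fun s a => if cond e a then PySem.Set.add s (f a) else s) s) s)
      ↔ y ∈ s ∨ ∃ e ∈ l, ∃ a ∈ g e, cond e a ∧ y = f a := by
  induction l generalizing s with
  | nil => simp
  | cons e rest ih =>
    simp only [List.foldl_cons, ih, mem_if_add_fold]
    constructor
    · rintro ((h | ⟨a, ha, hc, hy⟩) | ⟨e', he', a, ha, hc, hy⟩)
      · exact Or.inl h
      · exact Or.inr ⟨e, List.mem_cons_self, a, ha, hc, hy⟩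
      · exact Or.inr ⟨e', List.mem_cons_of_mem e he', a, ha, hc, hy⟩
    · rintro (h | ⟨e', he', a, ha, hc, hy⟩)
      · exact Or.inl (Or.inl h)
      · rcases List.mem_cons.mp he' with rfl | he''
        · exact Or.inl (Or.inr ⟨a, ha, hc, hy⟩)
        · exact Or.inr ⟨e', he'', a, ha, hc, hy⟩

-- lookup in a dict built by inserting f k for each key of a list
lemma getD_foldl_insert_fn {κ ν : Type} [BEq κ] [LawfulBEq κ] [DecidableEq κ]
    (f : κ → ν) (l : List κ) (d : PySem.Dict κ ν) (ch : κ) (d0 : ν) :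
    ((l.foldl (fun d k => d.insert k (f k)) d).getD ch d0)
      = if ch ∈ l then f ch else d.getD ch d0 := by
  induction l generalizing d with
  | nil => simp
  | cons k rest ih =>
    simp only [List.foldl_cons, ih, List.mem_cons]
    by_cases h : ch ∈ rest
    · simp [h]
    · by_cases hk : ch = k
      · subst hk; simp [h]
      · simp [h, hk, PySem.Dict.getD_insert]

-- the first-character index holds exactly the pairs whose keyword starts with ch
lemma bucket_eq (ch : Char) :
    PySem.Dict.getD keywordIndex ch []
      = keywordPairs.filter (fun q => firstChar q.1 == ch) := by
  unfold keywordIndex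
  rw [getD_foldl_insert_fn]
  by_cases h : ch ∈ PySem.Set.ofList (keywordPairs.map (fun q => firstChar q.1))
  · simp [h]
  · simp only [h, if_false]
    have hemp : (PySem.Dict.empty : PySem.Dict Char (List (String × String))).getD ch [] = [] := rfl
    rw [hemp, eq_comm, List.filter_eq_nil_iff]
    intro q hq hfc
    exact h ((PySem.Set.mem_ofList _ _).mpr
      (List.mem_map.mpr ⟨q, hq, by simpa using hfc⟩))

-- a nonempty keyword occurs in L iff it starts at some position of L
lemma isIn_iff_exists_start (kw L : List Char) (h : kw ≠ []) :
    PySem.Chars.isIn kw L = true ↔ ∃ j < L.length, kw.isPrefixOf (L.drop j) = true := by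
  constructor
  · intro hin
    rcases (PySem.Chars.exists_prefix_drop_iff_isIn kw L).mpr hin with ⟨j, hpre⟩
    refine ⟨j, ?_, List.isPrefixOf_iff_prefix.mpr hpre⟩
    by_contra hj
    have : L.drop j = [] := List.drop_eq_nil_of_le (Nat.le_of_not_lt hj)
    rw [this] at hpre
    exact h (List.prefix_nil.mp hpre)
  · rintro ⟨j, _, hpre⟩
    exact (PySem.Chars.exists_prefix_drop_iff_isIn kw L).mp
      ⟨j, List.isPrefixOf_iff_prefix.mp hpre⟩

-- a keyword that starts at position j starts with L[j]
lemma firstChar_of_prefix (q : String × String) (hq : q ∈ keywordPairs)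
    (L : List Char) (j : Nat) (hj : j < L.length)
    (hpre : q.1.toList.isPrefixOf (L.drop j) = true) : firstChar q.1 = L[j] := by
  have hpre' := List.isPrefixOf_iff_prefix.mp hpre
  rcases hne : q.1.toList with _ | ⟨c, rest⟩
  · exact absurd hne (pairs_ne_nil q hq)
  · rw [hne] at hpre'
    rcases hpre' with ⟨t, ht⟩
    have hhead : (L.drop j).head? = some c := by rw [← ht]; rfl
    have h2 : L[j]? = some c := by rw [← List.head?_drop]; exact hhead
    rw [List.getElem?_eq_getElem hj] at h2
    have hLj : L[j] = c := by simpa using h2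
    simp [firstChar, hne, hLj]

-- B's set membership equals "some keyword of the pair list occurs in L"
lemma mem_matched_iff (L : List Char) (y : String) :
    (y ∈ (PySem.List.enumerate L).foldl
        (fun s e =>
          (PySem.Dict.getD keywordIndex e.2 []).foldl
            (fun s q => if q.1.toList.isPrefixOf (L.drop e.1.toNat)
                        then PySem.Set.add s q.2 else s) s)
        PySem.Set.empty)
      ↔ ∃ q ∈ keywordPairs, PySem.Chars.isIn q.1.toList L = true ∧ y = q.2 := by
  refine Iff.trans (mem_scan_fold (fun e : Int × Char => PySem.Dict.getD keywordIndex e.2 [])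
    (fun (e : Int × Char) (q : String × String) => q.1.toList.isPrefixOf (L.drop e.1.toNat))
    Prod.snd (PySem.List.enumerate L) PySem.Set.empty y) ?_
  constructor
  · rintro (h | ⟨e, he, q, hq, hc, hy⟩)
    · exact absurd h List.not_mem_nil
    · rcases (PySem.List.mem_enumerate_iff ..).mp he with ⟨k, hk, rfl⟩
      have hq' : q ∈ keywordPairs := List.mem_of_mem_filter (bucket_eq _ ▸ hq)
      refine ⟨q, hq', ?_, hy⟩
      have hkt : ((0 : Int) + (k : Int)).toNat = k := by omega
      rw [hkt] at hc
      exact (isIn_iff_exists_start q.1.toList L (pairs_ne_nil q hq')).mpr ⟨k, hk, hc⟩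
  · rintro ⟨q, hq, hin, hy⟩
    rcases (isIn_iff_exists_start q.1.toList L (pairs_ne_nil q hq)).mp hin with ⟨j, hj, hpre⟩
    refine Or.inr ⟨((0 : Int) + (j : Int), L[j]),
      (PySem.List.mem_enumerate_iff ..).mpr ⟨j, hj, rfl⟩, q, ?_, ?_, hy⟩
    · rw [bucket_eq, List.mem_filter]
      exact ⟨hq, by simpa using firstChar_of_prefix q hq L j hj hpre⟩
    · have hkt : ((0 : Int) + (j : Int)).toNat = j := by omega
      rw [hkt]; exact hpre

-- if p then some∘fst else none  =  map fst ∘ filter p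
lemma filterMap_ite_eq_map_filter {α β : Type} (cond : α → Bool) (f : α → β) :
    ∀ l : List α, l.filterMap (fun a => if cond a then some (f a) else none)
      = (l.filter cond).map f
  | [] => rfl
  | a :: l => by
    by_cases h : cond a = true <;>
      simp [h, filterMap_ite_eq_map_filter cond f l]

-- B's key-filter over the matched set equals the filterMap keyed by occurrence in L
lemma matched_filter_eq (L : List Char) :
    ((threatTypes.map Prod.fst).filter (fun c => PySem.Set.contains
        ((PySem.List.enumerate L).foldl
          (fun s e =>
            (PySem.Dict.getD keywordIndex e.2 []).foldl
              (fun s q => if q.1.toList.isPrefixOf (L.drop e.1.toNat)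
                          then PySem.Set.add s q.2 else s) s)
          PySem.Set.empty) c))
      = threatTypes.filterMap
          (fun p => if p.2.any (fun kw => PySem.Chars.isIn kw.toList L)
                    then some p.1 else none) := by
  rw [filterMap_ite_eq_map_filter, List.filter_map]
  apply congrArg (List.map Prod.fst)
  apply List.filter_congr
  intro p hp
  simp only [Function.comp]
  rw [Bool.eq_iff_iff, PySem.Set.contains_iff, mem_matched_iff]
  constructor
  · rintro ⟨q, hq, hin, hy⟩
    rcases List.mem_flatMap.mp hq with ⟨r, hr, hqr⟩
    rcases List.mem_map.mp hqr with ⟨kw, hkw, rfl⟩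
    have hrp : r = p := key_determines r hr p hp hy.symm
    subst hrp
    exact List.any_eq_true.mpr ⟨kw, hkw, hin⟩
  · intro h
    rcases List.any_eq_true.mp h with ⟨kw, hkw, hin⟩
    exact ⟨(kw, p.1), List.mem_flatMap.mpr ⟨p, hp, List.mem_map.mpr ⟨kw, hkw, rfl⟩⟩,
      hin, rfl⟩

-- ===== VERDICT (by name: the statement is the Claim_ definition above) =====
theorem categorize_threat_spec : Claim_equal_categorize_threat := by
  intro title content _
  unfold Spec_categorize_threat categorize_threat categorize_threat_alt
  cases content with
  | none =>
    simp only [PySem.Str.isIn_eq, PySem.Str.toList_lower, String.toList_empty]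
    rw [loop_eq (PySem.Chars.lower title.toList) [] threatTypes no_newline_keywords [],
      matched_filter_eq]
    simp
  | some c =>
    simp only [PySem.Str.isIn_eq, PySem.Str.toList_lower]
    rw [loop_eq (PySem.Chars.lower title.toList) (PySem.Chars.lower c.toList)
        threatTypes no_newline_keywords [], matched_filter_eq]
    simp
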